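-- pv_equiv track=rewrite | github.com/clipo/PancsVriend | paper/results-table/generate_tables.py | filter_mechanical_from_parsed
-- ===== SOURCE A (Python) =====
-- def filter_mechanical_from_parsed(parsed_data):
--     """Filter out mechanical scenario from already parsed data"""
--     filtered = []
--
--     for i, (group, relation) in enumerate(parsed_data):
--         # Remove mechanical from the group
--         filtered_group = [s for s in group if s != 'mechanical']
--
--         if filtered_group:  # Only add if group is not empty
--             if i == len(parsed_data) - 1:
--                 # Last group - no relation
--                 filtered.append((filtered_group, ''))
--             else:
--                 # Check if next group exists and adjust relation accordingly
--                 next_group_has_non_mechanical = False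
--                 for j in range(i + 1, len(parsed_data)):
--                     next_filtered_group = [s for s in parsed_data[j][0] if s != 'mechanical']
--                     if next_filtered_group:
--                         next_group_has_non_mechanical = True
--                         break
--
--                 if next_group_has_non_mechanical:
--                     filtered.append((filtered_group, relation))
--                 else:
--                     filtered.append((filtered_group, ''))
--
--     return filtered
-- ===== SOURCE B (Python) =====
-- def filter_mechanical_from_parsed(parsed_data):
--     """Filter out mechanical scenario from already parsed data (single reverse pass)."""
--     out = []
--     later_has = False
--     for group, relation in reversed(parsed_data):
--         fg = [s for s in group if s != 'mechanical']
--         if fg: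
--             out.append((fg, relation if later_has else ''))
--             later_has = True
--     out.reverse()
--     return out
-- ===== Notes on version B (the rewrite author's own statement) =====
-- stated objective: alternative
-- what changed: A rescans all later groups for every kept group (nested loop with break); B makes one reverse pass carrying a 'some later group survives' flag and reverses the result, so the inner scan disappears.
import Mathlib
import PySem

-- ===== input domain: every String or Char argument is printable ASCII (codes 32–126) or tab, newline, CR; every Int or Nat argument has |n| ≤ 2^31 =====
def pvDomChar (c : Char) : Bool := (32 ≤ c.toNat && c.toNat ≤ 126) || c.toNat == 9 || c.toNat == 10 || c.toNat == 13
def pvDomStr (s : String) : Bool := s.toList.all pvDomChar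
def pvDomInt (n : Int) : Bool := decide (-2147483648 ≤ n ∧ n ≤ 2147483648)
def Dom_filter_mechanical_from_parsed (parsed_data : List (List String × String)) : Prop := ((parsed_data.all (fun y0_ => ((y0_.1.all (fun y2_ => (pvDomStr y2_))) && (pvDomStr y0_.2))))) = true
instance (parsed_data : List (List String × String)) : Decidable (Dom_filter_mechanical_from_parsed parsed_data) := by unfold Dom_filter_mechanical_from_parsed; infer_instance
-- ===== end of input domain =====

-- B replaces A's nested look-ahead (for each group, a scan of the later groups) by a single
-- reverse pass carrying one 'some later group survives' flag; objective: alternative algorithm.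

-- ===== PORT A =====
-- literal transliteration of A: enumerate loop, inner scan over range(i+1, len) with break
def filter_mechanical_from_parsed (parsed_data : List (List String × String)) : List (List String × String) :=
  (PySem.List.enumerate parsed_data 0).foldl (fun filtered p =>
    let i := p.1
    let group := p.2.1
    let relation := p.2.2
    let filtered_group := group.filter (fun s => s != "mechanical")
    if filtered_group ≠ [] then
      if i = PySem.List.len parsed_data - 1 then
        filtered ++ [(filtered_group, "")]
      else
        -- inner loop 'for j in range(i+1, len(...)): … break' as a short-circuiting fold;
        -- j is always in range, so pyGetD's default is never read
        let next_group_has_non_mechanical :=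
          (PySem.List.pyRange (i + 1) (PySem.List.len parsed_data) 1).foldl
            (fun b j =>
              if b then b
              else !((PySem.List.pyGetD parsed_data j ([], "")).1.filter (fun s => s != "mechanical")).isEmpty)
            false
        if next_group_has_non_mechanical then filtered ++ [(filtered_group, relation)]
        else filtered ++ [(filtered_group, "")]
    else filtered) []

-- ===== PORT B =====
-- literal transliteration of B: one pass over reversed(parsed_data) carrying (out, later_has), then reverse
def filter_mechanical_from_parsed_alt (parsed_data : List (List String × String)) : List (List String × String) :=
  let st := parsed_data.reverse.foldl (fun st gr =>
      let fg := gr.1.filter (fun s => s != "mechanical")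
      if fg ≠ [] then (st.1 ++ [(fg, if st.2 then gr.2 else "")], true)
      else st)
    (([] : List (List String × String)), false)
  st.1.reverse

-- ===== PRECONDITION & SPEC =====
def Spec_filter_mechanical_from_parsed (parsed_data : List (List String × String)) (out : List (List String × String)) : Prop := out = filter_mechanical_from_parsed_alt parsed_data
instance (parsed_data : List (List String × String)) (out : List (List String × String)) : Decidable (Spec_filter_mechanical_from_parsed parsed_data out) := by unfold Spec_filter_mechanical_from_parsed; infer_instance

-- ===== CLAIM (what is proved, stated in full; the proofs are below) =====
def Claim_equal_filter_mechanical_from_parsed : Prop := ∀ (parsed_data : List (List String × String)), Dom_filter_mechanical_from_parsed parsed_data → Spec_filter_mechanical_from_parsed parsed_data (filter_mechanical_from_parsed parsed_data)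

-- ===== LEMMAS AND PROOFS =====

-- the common reference function: for each group keep the non-'mechanical' part, relation kept
-- iff some later group still has a non-'mechanical' element
def pvP (q : List String × String) : Bool := !(q.1.filter (fun s => s != "mechanical")).isEmpty

def pvF : List (List String × String) → List (List String × String)
  | [] => []
  | (g, r) :: rest =>
      let fg := g.filter (fun s => s != "mechanical")
      (if fg ≠ [] then [(fg, if rest.any pvP then r else "")] else []) ++ pvF rest

theorem foldl_sc_or_any (l : List (List String × String)) (b0 : Bool) :
    l.foldl (fun b x => if b then b else pvP x) b0 = (b0 || l.any pvP) := by
  induction l generalizing b0 with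
  | nil => simp
  | cons x xs ih =>
    simp only [List.foldl_cons, List.any_cons, ih]
    cases b0 <;> simp

theorem altB_foldr (pd : List (List String × String)) :
    pd.foldr (fun gr st =>
        let fg := gr.1.filter (fun s => s != "mechanical")
        if fg ≠ [] then (st.1 ++ [(fg, if st.2 then gr.2 else "")], true)
        else st)
      (([] : List (List String × String)), false)
    = ((pvF pd).reverse, pd.any pvP) := by
  induction pd with
  | nil => simp [pvF]
  | cons x xs ih =>
    obtain ⟨g, r⟩ := x
    simp only [List.foldr_cons, ih, pvF, List.any_cons]
    by_cases h : g.filter (fun s => s != "mechanical") = []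
    · simp [h, pvP]
    · simp [h, pvP]

theorem altB_eq_pvF (pd : List (List String × String)) :
    filter_mechanical_from_parsed_alt pd = pvF pd := by
  unfold filter_mechanical_from_parsed_alt
  rw [List.foldl_reverse]
  simp only [altB_foldr, List.reverse_reverse]

theorem portA_go (suf pre acc : List (List String × String)) :
    (PySem.List.enumerate suf (pre.length : Int)).foldl (fun filtered p =>
      let i := p.1
      let group := p.2.1
      let relation := p.2.2
      let filtered_group := group.filter (fun s => s != "mechanical")
      if filtered_group ≠ [] then
        if i = PySem.List.len (pre ++ suf) - 1 then
          filtered ++ [(filtered_group, "")]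
        else
          let next_group_has_non_mechanical :=
            (PySem.List.pyRange (i + 1) (PySem.List.len (pre ++ suf)) 1).foldl
              (fun b j =>
                if b then b
                else !((PySem.List.pyGetD (pre ++ suf) j ([], "")).1.filter (fun s => s != "mechanical")).isEmpty)
              false
          if next_group_has_non_mechanical then filtered ++ [(filtered_group, relation)]
          else filtered ++ [(filtered_group, "")]
      else filtered) acc
    = acc ++ pvF suf := by
  induction suf generalizing pre acc with
  | nil => simp [pvF, PySem.List.enumerate_nil]
  | cons x rest ih =>
    obtain ⟨g, r⟩ := x
    rw [PySem.List.enumerate_cons, List.foldl_cons,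
        show pre ++ (g, r) :: rest = (pre ++ [(g, r)]) ++ rest by simp,
        show (pre.length : Int) + 1 = (((pre ++ [(g, r)]).length : Nat) : Int) by simp,
        ih (pre ++ [(g, r)])]
    simp only []
    have hlen : PySem.List.len ((pre ++ [(g, r)]) ++ rest)
        = (pre.length : Int) + 1 + rest.length := by
      simp [PySem.List.len_eq]; ring
    have hlast : ((pre.length : Int) = PySem.List.len ((pre ++ [(g, r)]) ++ rest) - 1) ↔ rest = [] := by
      rw [hlen]
      constructor
      · intro h
        have : rest.length = 0 := by omega
        exact List.length_eq_zero_iff.mp this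
      · intro h; subst h; simp
    have hdrop : ((pre ++ [(g, r)]) ++ rest).drop ((pre.length : Int) + 1).toNat = rest := by
      rw [show ((pre.length : Int) + 1) = ((pre.length + 1 : Nat) : Int) by push_cast; ring,
          Int.toNat_natCast,
          show pre.length + 1 = (pre ++ [(g, r)]).length by simp,
          List.drop_left]
    have hscan : (PySem.List.pyRange ((pre.length : Int) + 1) (PySem.List.len ((pre ++ [(g, r)]) ++ rest)) 1).foldl
          (fun b j =>
            if b then b
            else !((PySem.List.pyGetD ((pre ++ [(g, r)]) ++ rest) j ([], "")).1.filter (fun s => s != "mechanical")).isEmpty)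
          false = rest.any pvP := by
      rw [PySem.List.foldl_pyRange_pyGetD ((pre ++ [(g, r)]) ++ rest) ([], "")
            (fun (b : Bool) (x : List String × String) =>
              if b then b else !(x.1.filter (fun s => s != "mechanical")).isEmpty)
            false (by omega), hdrop]
      simpa [pvP] using foldl_sc_or_any rest false
    rw [hscan]
    simp only [pvF]
    split_ifs with h1 h2 h3 h4
    · rw [hlast] at h2; subst h2; simp_all
    · simp [List.append_assoc]
    · simp [List.append_assoc]
    · simp [List.append_assoc]
    · simp

theorem portA_eq_pvF (pd : List (List String × String)) :
    filter_mechanical_from_parsed pd = pvF pd := by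
  have h := portA_go pd [] []
  simp only [List.nil_append, List.length_nil, Nat.cast_zero] at h
  exact h

-- ===== VERDICT (by name: the statement is the Claim_ definition above) =====
theorem filter_mechanical_from_parsed_spec : Claim_equal_filter_mechanical_from_parsed := by
  intro pd _
  unfold Spec_filter_mechanical_from_parsed
  rw [portA_eq_pvF, altB_eq_pvF]
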